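-- pv_equiv track=rewrite | github.com/dopexthrone/MeaningWorks | mother/stakeholder_modeling.py | identify_stakeholders
-- ===== SOURCE A (Python) =====
-- from typing import Dict, FrozenSet, List, Optional, Tuple
--
-- _STAKEHOLDER_ROLES: Dict[str, FrozenSet[str]] = {
--     "end-user": frozenset({"user", "customer", "consumer", "visitor", "subscriber", "client", "buyer"}),
--     "developer": frozenset({"developer", "engineer", "programmer", "devops", "architect", "coder"}),
--     "business": frozenset({"founder", "ceo", "manager", "executive", "stakeholder", "investor", "board"}),
--     "operations": frozenset({"ops", "admin", "support", "helpdesk", "moderator", "sysadmin"}),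
--     "compliance": frozenset({"legal", "compliance", "auditor", "regulator", "privacy", "security"}),
--     "partner": frozenset({"partner", "vendor", "supplier", "integration", "third-party", "affiliate"}),
-- }
--
-- def identify_stakeholders(description: str) -> List[str]:
--     """Identify stakeholder roles from a text description.
--
--     Uses frozenset intersection per role keyword set.
--     Returns list of detected role names.
--     """
--     if not description:
--         return []
--
--     words = frozenset(description.lower().split())
--     detected: List[str] = []
--
--     for role, keywords in _STAKEHOLDER_ROLES.items():
--         if words & keywords:
--             detected.append(role)
--
--     return detected
-- ===== SOURCE B (Python) =====
-- _ROLE_ORDER = ["end-user", "developer", "business", "operations", "compliance", "partner"]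
--
-- # reverse index: keyword -> owning role (keyword sets are disjoint)
-- _KEYWORD_TO_ROLE = {
--     "user": "end-user", "customer": "end-user", "consumer": "end-user",
--     "visitor": "end-user", "subscriber": "end-user", "client": "end-user", "buyer": "end-user",
--     "developer": "developer", "engineer": "developer", "programmer": "developer",
--     "devops": "developer", "architect": "developer", "coder": "developer",
--     "founder": "business", "ceo": "business", "manager": "business",
--     "executive": "business", "stakeholder": "business", "investor": "business", "board": "business",
--     "ops": "operations", "admin": "operations", "support": "operations",
--     "helpdesk": "operations", "moderator": "operations", "sysadmin": "operations",
--     "legal": "compliance", "compliance": "compliance", "auditor": "compliance",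
--     "regulator": "compliance", "privacy": "compliance", "security": "compliance",
--     "partner": "partner", "vendor": "partner", "supplier": "partner",
--     "integration": "partner", "third-party": "partner", "affiliate": "partner",
-- }
--
--
-- def identify_stakeholders(description):
--     if not description:
--         return []
--     detected = set()
--     for word in description.lower().split():
--         role = _KEYWORD_TO_ROLE.get(word)
--         if role is not None:
--             detected.add(role)
--     return [role for role in _ROLE_ORDER if role in detected]
-- ===== Notes on version B (the rewrite author's own statement) =====
-- stated objective: idiomatic
-- what changed: Replaces the per-role frozenset-intersection scan by a precomputed keyword-to-role reverse index consulted once per word, then emits detected roles in the fixed role order.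
import Mathlib
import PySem

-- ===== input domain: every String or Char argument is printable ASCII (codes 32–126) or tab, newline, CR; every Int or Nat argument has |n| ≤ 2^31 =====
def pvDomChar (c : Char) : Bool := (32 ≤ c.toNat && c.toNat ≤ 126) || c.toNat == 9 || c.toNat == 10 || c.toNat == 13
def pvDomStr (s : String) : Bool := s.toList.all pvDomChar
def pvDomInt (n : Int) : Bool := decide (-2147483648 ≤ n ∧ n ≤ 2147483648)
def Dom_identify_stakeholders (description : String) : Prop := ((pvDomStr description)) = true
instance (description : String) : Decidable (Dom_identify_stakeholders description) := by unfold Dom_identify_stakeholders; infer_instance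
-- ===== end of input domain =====

-- B replaces A's per-role frozenset-intersection scan by a precomputed keyword→role reverse
-- index consulted once per word of the description (objective: idiomatic single pass over the words).

-- ===== PORT A =====
def pvRolesA : List (String × List String) :=
  [("end-user", ["user", "customer", "consumer", "visitor", "subscriber", "client", "buyer"]),
   ("developer", ["developer", "engineer", "programmer", "devops", "architect", "coder"]),
   ("business", ["founder", "ceo", "manager", "executive", "stakeholder", "investor", "board"]),
   ("operations", ["ops", "admin", "support", "helpdesk", "moderator", "sysadmin"]),
   ("compliance", ["legal", "compliance", "auditor", "regulator", "privacy", "security"]),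
   ("partner", ["partner", "vendor", "supplier", "integration", "third-party", "affiliate"])]

def identify_stakeholders (description : String) : List String :=
  if description = "" then []
  else
    let words : PySem.Set String := PySem.Set.ofList (PySem.Str.split₀ (PySem.Str.lower description))
    pvRolesA.foldl
      (fun detected rk =>
        if !(PySem.Set.inter words rk.2).isEmpty then detected ++ [rk.1] else detected) []

-- ===== PORT B =====
def pvKwToRole : PySem.Dict String String :=
  PySem.Dict.ofList
    [("user", "end-user"), ("customer", "end-user"), ("consumer", "end-user"), ("visitor", "end-user"), ("subscriber", "end-user"), ("client", "end-user"), ("buyer", "end-user"),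
     ("developer", "developer"), ("engineer", "developer"), ("programmer", "developer"), ("devops", "developer"), ("architect", "developer"), ("coder", "developer"),
     ("founder", "business"), ("ceo", "business"), ("manager", "business"), ("executive", "business"), ("stakeholder", "business"), ("investor", "business"), ("board", "business"),
     ("ops", "operations"), ("admin", "operations"), ("support", "operations"), ("helpdesk", "operations"), ("moderator", "operations"), ("sysadmin", "operations"),
     ("legal", "compliance"), ("compliance", "compliance"), ("auditor", "compliance"), ("regulator", "compliance"), ("privacy", "compliance"), ("security", "compliance"),
     ("partner", "partner"), ("vendor", "partner"), ("supplier", "partner"), ("integration", "partner"), ("third-party", "partner"), ("affiliate", "partner")]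

def pvRoleOrder : List String :=
  ["end-user", "developer", "business", "operations", "compliance", "partner"]

def identify_stakeholders_alt (description : String) : List String :=
  if description = "" then []
  else
    let detected : PySem.Set String :=
      (PySem.Str.split₀ (PySem.Str.lower description)).foldl
        (fun acc w =>
          match PySem.Dict.get? pvKwToRole w with
          | some role => PySem.Set.add acc role
          | none => acc) PySem.Set.empty
    pvRoleOrder.filter (fun role => PySem.Set.contains detected role)

-- ===== PRECONDITION & SPEC =====
def Spec_identify_stakeholders (description : String) (out : List String) : Prop := out = identify_stakeholders_alt description
instance (description : String) (out : List String) : Decidable (Spec_identify_stakeholders description out) := by unfold Spec_identify_stakeholders; infer_instance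

-- ===== CLAIM (what is proved, stated in full; the proofs are below) =====
def Claim_equal_identify_stakeholders : Prop := ∀ (description : String), Dom_identify_stakeholders description → Spec_identify_stakeholders description (identify_stakeholders description)

-- ===== LEMMAS AND PROOFS =====

-- the detected set collects exactly the roles some word of ws maps to
theorem pv_mem_fold (ws : List String) (acc : PySem.Set String) (r : String) :
    r ∈ ws.foldl
        (fun acc w =>
          match PySem.Dict.get? pvKwToRole w with
          | some role => PySem.Set.add acc role
          | none => acc) acc ↔
      r ∈ acc ∨ ∃ w ∈ ws, PySem.Dict.get? pvKwToRole w = some r := by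
  induction ws generalizing acc with
  | nil => simp
  | cons w ws ih =>
    simp only [List.foldl_cons]
    cases h : PySem.Dict.get? pvKwToRole w with
    | none => rw [ih]; simp [h]
    | some x =>
      rw [ih]
      simp only [PySem.Set.mem_add, List.mem_cons]
      constructor
      · rintro (⟨h1 | rfl⟩ | ⟨w', hw', hg⟩)
        · exact Or.inl h1
        · exact Or.inr ⟨w, Or.inl rfl, h⟩
        · exact Or.inr ⟨w', Or.inr hw', hg⟩
      · rintro (h1 | ⟨w', (rfl | hw'), hg⟩)
        · exact Or.inl (Or.inl h1)
        · rw [h] at hg; exact Or.inl (Or.inr (Option.some_injective _ hg).symm)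
        · exact Or.inr ⟨w', hw', hg⟩

-- first-match lookup in a literal dict with distinct keys is list membership
theorem pv_get?_mk (l : List (String × String)) (hnd : (l.map Prod.fst).Nodup) (w r : String) :
    (PySem.Dict.mk l).get? w = some r ↔ (w, r) ∈ l := by
  induction l with
  | nil => simp [PySem.Dict.get?]
  | cons p rest ih =>
    obtain ⟨k, v⟩ := p
    simp only [List.map_cons, List.nodup_cons] at hnd
    rw [PySem.Dict.get?_mk_cons]
    by_cases hk : k = w
    · subst hk
      rw [if_pos (by simp)]
      constructor
      · intro h
        injection h with h
        subst h
        exact List.mem_cons_self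
      · intro hmem
        rcases List.mem_cons.mp hmem with heq | hmem
        · have h2 : r = v := congrArg Prod.snd heq
          subst h2
          rfl
        · exact absurd (List.mem_map_of_mem (f := Prod.fst) hmem) (by simpa using hnd.1)
    · rw [if_neg (by simpa using hk), ih hnd.2]
      simp only [List.mem_cons, Prod.mk.injEq]
      constructor
      · exact Or.inr
      · rintro (⟨rfl, -⟩ | h)
        · exact absurd rfl hk
        · exact h

-- the reverse-index dict written out as a literal association list
set_option maxRecDepth 8192 in
theorem pv_kw_mk : pvKwToRole = PySem.Dict.mk
    [("user", "end-user"), ("customer", "end-user"), ("consumer", "end-user"), ("visitor", "end-user"), ("subscriber", "end-user"), ("client", "end-user"), ("buyer", "end-user"),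
     ("developer", "developer"), ("engineer", "developer"), ("programmer", "developer"), ("devops", "developer"), ("architect", "developer"), ("coder", "developer"),
     ("founder", "business"), ("ceo", "business"), ("manager", "business"), ("executive", "business"), ("stakeholder", "business"), ("investor", "business"), ("board", "business"),
     ("ops", "operations"), ("admin", "operations"), ("support", "operations"), ("helpdesk", "operations"), ("moderator", "operations"), ("sysadmin", "operations"),
     ("legal", "compliance"), ("compliance", "compliance"), ("auditor", "compliance"), ("regulator", "compliance"), ("privacy", "compliance"), ("security", "compliance"),
     ("partner", "partner"), ("vendor", "partner"), ("supplier", "partner"), ("integration", "partner"), ("third-party", "partner"), ("affiliate", "partner")] := by decide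

set_option maxRecDepth 8192 in
theorem pv_kw1 (w : String) :
    (PySem.Dict.get? pvKwToRole w = some "end-user") ↔ w ∈ ["user", "customer", "consumer", "visitor", "subscriber", "client", "buyer"] := by
  rw [pv_kw_mk, pv_get?_mk _ (by decide)]
  simp

set_option maxRecDepth 8192 in
theorem pv_kw2 (w : String) :
    (PySem.Dict.get? pvKwToRole w = some "developer") ↔ w ∈ ["developer", "engineer", "programmer", "devops", "architect", "coder"] := by
  rw [pv_kw_mk, pv_get?_mk _ (by decide)]
  simp

set_option maxRecDepth 8192 in
theorem pv_kw3 (w : String) :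
    (PySem.Dict.get? pvKwToRole w = some "business") ↔ w ∈ ["founder", "ceo", "manager", "executive", "stakeholder", "investor", "board"] := by
  rw [pv_kw_mk, pv_get?_mk _ (by decide)]
  simp

set_option maxRecDepth 8192 in
theorem pv_kw4 (w : String) :
    (PySem.Dict.get? pvKwToRole w = some "operations") ↔ w ∈ ["ops", "admin", "support", "helpdesk", "moderator", "sysadmin"] := by
  rw [pv_kw_mk, pv_get?_mk _ (by decide)]
  simp

set_option maxRecDepth 8192 in
theorem pv_kw5 (w : String) :
    (PySem.Dict.get? pvKwToRole w = some "compliance") ↔ w ∈ ["legal", "compliance", "auditor", "regulator", "privacy", "security"] := by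
  rw [pv_kw_mk, pv_get?_mk _ (by decide)]
  simp

set_option maxRecDepth 8192 in
theorem pv_kw6 (w : String) :
    (PySem.Dict.get? pvKwToRole w = some "partner") ↔ w ∈ ["partner", "vendor", "supplier", "integration", "third-party", "affiliate"] := by
  rw [pv_kw_mk, pv_get?_mk _ (by decide)]
  simp

-- core: for any word list, A's role scan equals B's reverse-index pass
theorem pv_core (ws : List String) :
    pvRolesA.foldl
      (fun detected rk =>
        if !(PySem.Set.inter (PySem.Set.ofList ws) rk.2).isEmpty then detected ++ [rk.1] else detected) [] =
    pvRoleOrder.filter (fun role => PySem.Set.contains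
      (ws.foldl (fun acc w =>
          match PySem.Dict.get? pvKwToRole w with
          | some role => PySem.Set.add acc role
          | none => acc) PySem.Set.empty) role) := by
  rw [PySem.List.foldl_append_if]
  rw [show pvRoleOrder = pvRolesA.map Prod.fst from rfl, List.filter_map]
  rw [List.nil_append]
  apply congrArg
  apply List.filter_congr
  intro rk hrk
  fin_cases hrk <;>
    ·  rw [Bool.eq_iff_iff]
       simp only [Function.comp_apply, Bool.not_eq_true', List.isEmpty_eq_false_iff_exists_mem,
         PySem.Set.mem_inter, PySem.Set.mem_ofList, PySem.Set.contains_iff, pv_mem_fold,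
         pv_kw1, pv_kw2, pv_kw3, pv_kw4, pv_kw5, pv_kw6]
       simp only [PySem.Set.empty, List.not_mem_nil, false_or, List.mem_cons, List.not_mem_nil, or_false]

theorem identify_stakeholders_eq (description : String) :
    identify_stakeholders description = identify_stakeholders_alt description := by
  unfold identify_stakeholders identify_stakeholders_alt
  by_cases hd : description = ""
  · simp [hd]
  · simp only [if_neg hd]
    exact pv_core _

-- ===== VERDICT (by name: the statement is the Claim_ definition above) =====
theorem identify_stakeholders_spec : Claim_equal_identify_stakeholders := by
  intro d _
  exact identify_stakeholders_eq d
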